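-- pv_equiv track=rewrite | github.com/byt3n33dl3/Teeth | kchash/trainer/ersatz_intern.py | detect_digits
-- ===== SOURCE A (Python) =====
-- token_seperator = [' ']
--
-- def detect_digits(input_pw):
--
--     ##--quick sanity bail out if the string is empty
--     if not input_pw:
--         return
--
--     ##--tells if there is a current run going on. Start as true so we don't split if the
--     ##--first character is a digit
--     current_run = True
--
--     ##--Initialize the results. Don't split on the first character...
--     final_pw = []
--
--     ##--Walk through the rest of the string and add spaces if character is uppercase
--     for c in input_pw:
--         if c.isdigit():
--             ##--If it is a ongoing run, don't split, continue the run
--             if current_run: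
--                 final_pw.append(c.lower())
--             ##--Else start an run, split the word
--             else:
--                 current_run = True
--                 final_pw.append(token_seperator[0] + c.lower())
--         else:
--             ##--If this is a token seperator, start a run so we don't have two spaces if we split on next character
--             if c in token_seperator:
--                 current_run = True
--
--             else:
--                 ##--No longer a run
--                 current_run = False
--
--             ##--Save the lowercase character
--             final_pw.append(c.lower())
--
--     return ''.join(final_pw)
-- ===== SOURCE B (Python) =====
-- def detect_digits(input_pw):
--     if not input_pw:
--         return None
--     # Stage 1: lowercase once, then cut the string into maximal runs of
--     # same digit-class (digit run / non-digit run) using index scans.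
--     s = input_pw.lower()
--     n = len(s)
--     groups = []
--     i = 0
--     while i < n:
--         d = s[i].isdigit()
--         j = i
--         while j < n and s[j].isdigit() == d:
--             j += 1
--         groups.append((d, s[i:j]))
--         i = j
--     # Stage 2: join the runs, putting a separator before a digit run unless
--     # the text built so far already ends with the separator.
--     out = groups[0][1]
--     for d, g in groups[1:]:
--         if d and not out.endswith(' '):
--             out += ' '
--         out += g
--     return out
-- ===== Notes on version B (the rewrite author's own statement) =====
-- stated objective: alternative
-- what changed: A's single-pass per-character state machine (a current_run flag, lowering and appending one character at a time) is replaced by a staged algorithm: lowercase the whole string once, cut it into maximal digit/non-digit runs with index scans and slices, then join the runs inserting a separator before a digit run unless the text already ends with one.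
import Mathlib
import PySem

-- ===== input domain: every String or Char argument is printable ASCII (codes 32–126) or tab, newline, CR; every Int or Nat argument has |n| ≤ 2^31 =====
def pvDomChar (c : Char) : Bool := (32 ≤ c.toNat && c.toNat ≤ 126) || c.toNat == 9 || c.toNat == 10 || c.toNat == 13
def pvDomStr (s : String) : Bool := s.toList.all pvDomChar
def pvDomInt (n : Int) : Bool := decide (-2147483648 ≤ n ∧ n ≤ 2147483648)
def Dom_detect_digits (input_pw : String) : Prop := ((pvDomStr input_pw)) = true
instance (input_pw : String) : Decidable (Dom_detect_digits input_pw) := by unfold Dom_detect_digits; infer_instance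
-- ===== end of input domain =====

-- B replaces A's per-character run-state machine by a staged algorithm: lowercase once,
-- cut into maximal digit/non-digit runs, then join the runs (objective: alternative).

-- ===== PORT A =====
-- token_seperator = [' ']
def tokenSeperator : List Char := [' ']

-- one iteration of A's for-loop over state (current_run, final_pw)
def detectDigitsStep (st : Bool × List Char) (c : Char) : Bool × List Char :=
  if PySem.Chars.isdigit c then
    if st.1 then (st.1, st.2 ++ [PySem.Chars.lowerChar c])
    else (true, st.2 ++ (tokenSeperator.headI :: [PySem.Chars.lowerChar c]))
  else
    if c ∈ tokenSeperator then (true, st.2 ++ [PySem.Chars.lowerChar c])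
    else (false, st.2 ++ [PySem.Chars.lowerChar c])

def detect_digits (input_pw : String) : Option String :=
  if input_pw.toList = [] then none
  else
    some (String.ofList (input_pw.toList.foldl detectDigitsStep (true, [])).2)

-- ===== PORT B =====
-- stage 1 of Source B: the two index-scanning while loops cut the lowered string into maximal
-- runs of one digit-class; the inner scan s[i:j] is ported as takeWhile/dropWhile (the same
-- maximal run and the same remainder).
def ddRuns (cs : List Char) : List (Bool × List Char) :=
  match cs with
  | [] => []
  | c :: rest =>
    let d := PySem.Chars.isdigit c
    (d, c :: rest.takeWhile (fun x => PySem.Chars.isdigit x == d)) ::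
      ddRuns (rest.dropWhile (fun x => PySem.Chars.isdigit x == d))
termination_by cs.length
decreasing_by
  simp only [List.length_cons]
  exact Nat.lt_succ_of_le (List.length_dropWhile_le _ _)

-- stage 2 of Source B: one join step; `out.endswith(' ')` is ported as `out.getLast? == some ' '`
-- (endswith with a single-character suffix, exact).
def ddJoinStep (out : List Char) (g : Bool × List Char) : List Char :=
  (if g.1 && !(out.getLast? == some ' ') then out ++ [' '] else out) ++ g.2

def detect_digits_alt (input_pw : String) : Option String :=
  if input_pw.toList = [] then none
  else
    match ddRuns (PySem.Chars.lower input_pw.toList) with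
    | [] => none   -- unreachable: a non-empty string has at least one run
    | (_, g0) :: gs => some (String.ofList (gs.foldl ddJoinStep g0))

-- ===== PRECONDITION & SPEC =====
def Spec_detect_digits (input_pw : String) (out : Option String) : Prop := out = detect_digits_alt input_pw
instance (input_pw : String) (out : Option String) : Decidable (Spec_detect_digits input_pw out) := by unfold Spec_detect_digits; infer_instance

-- ===== CLAIM (what is proved, stated in full; the proofs are below) =====
def Claim_equal_detect_digits : Prop := ∀ (input_pw : String), Dom_detect_digits input_pw → Spec_detect_digits input_pw (detect_digits input_pw)

-- ===== LEMMAS AND PROOFS =====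

-- characters 'a'..'z' (the image of lowerChar on uppercase letters) are neither digits nor ' '
theorem ddLowerImage (k : Nat) (h1 : 97 ≤ k) (h2 : k ≤ 122) :
    PySem.Chars.isdigit (Char.ofNat k) = false ∧ ((Char.ofNat k) == ' ') = false := by
  interval_cases k <;> exact ⟨by decide, by decide⟩

theorem ddIsdigitLower (c : Char) :
    PySem.Chars.isdigit (PySem.Chars.lowerChar c) = PySem.Chars.isdigit c := by
  unfold PySem.Chars.lowerChar
  split_ifs with h
  · unfold PySem.Chars.isupper at h
    simp only [Bool.and_eq_true, decide_eq_true_eq, Char.le_def] at h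
    have h1 : 65 ≤ c.toNat := Nat.succ_le_of_lt h.1
    have h2 : c.toNat ≤ 90 := h.2
    have hd : PySem.Chars.isdigit c = false := by
      have hn : ¬ c ≤ '9' := by
        intro hle
        rw [Char.le_def, UInt32.le_iff_toNat_le] at hle
        have h9 : c.toNat ≤ 57 := hle
        omega
      simp [PySem.Chars.isdigit, hn]
    rw [hd, (ddLowerImage (c.toNat + 32) (by omega) (by omega)).1]
  · rfl

theorem ddSpaceLower (c : Char) : (PySem.Chars.lowerChar c == ' ') = (c == ' ') := by
  unfold PySem.Chars.lowerChar
  split_ifs with h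
  · unfold PySem.Chars.isupper at h
    simp only [Bool.and_eq_true, decide_eq_true_eq, Char.le_def] at h
    have h1 : 65 ≤ c.toNat := Nat.succ_le_of_lt h.1
    have h2 : c.toNat ≤ 90 := h.2
    rw [(ddLowerImage (c.toNat + 32) (by omega) (by omega)).2]
    have : (c == ' ') = false := by
      simp only [beq_eq_false_iff_ne, ne_eq]
      intro he; subst he; simp at h1
    rw [this]
  · rfl

-- the common specification language: what is emitted for one character, and the run state
def ddPiece' (run : Bool) (c : Char) : List Char :=
  if PySem.Chars.isdigit c && !run then [' ', c] else [c]

def ddNext' (c : Char) : Bool :=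
  if PySem.Chars.isdigit c then true else c == ' '

def ddGen' (run : Bool) : List Char → List Char
  | [] => []
  | c :: cs => ddPiece' run c ++ ddGen' (ddNext' c) cs

def ddEnd (run : Bool) (xs : List Char) : Bool :=
  xs.foldl (fun _ c => ddNext' c) run

theorem ddEnd_concat (run : Bool) (xs : List Char) (a : Char) :
    ddEnd run (xs ++ [a]) = ddNext' a := by
  simp [ddEnd, List.foldl_append]

theorem ddGen'_append (xs : List Char) : ∀ (ys : List Char) (run : Bool),
    ddGen' run (xs ++ ys) = ddGen' run xs ++ ddGen' (ddEnd run xs) ys := by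
  induction xs with
  | nil => intro ys run; simp [ddGen', ddEnd]
  | cons x xs ih =>
    intro ys run
    simp only [List.cons_append, ddGen', ih, List.append_assoc, ddEnd, List.foldl_cons]

theorem ddGen'_digits (g : List Char) (hg : ∀ y ∈ g, PySem.Chars.isdigit y = true) :
    ddGen' true g = g := by
  induction g with
  | nil => rfl
  | cons y ys ih =>
    have hy := hg y (by simp)
    simp only [ddGen', ddPiece', ddNext', hy]
    simp [ih fun z hz => hg z (by simp [hz])]

theorem ddGen'_digits_false (g : List Char) (hne : g ≠ [])
    (hg : ∀ y ∈ g, PySem.Chars.isdigit y = true) :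
    ddGen' false g = ' ' :: g := by
  match g with
  | [] => exact absurd rfl hne
  | y :: ys =>
    have hy := hg y (by simp)
    simp only [ddGen', ddPiece', ddNext', hy]
    simp [ddGen'_digits ys fun z hz => hg z (by simp [hz])]

theorem ddGen'_nondigits (g : List Char) (hg : ∀ y ∈ g, PySem.Chars.isdigit y = false) :
    ∀ run, ddGen' run g = g := by
  induction g with
  | nil => intro run; rfl
  | cons y ys ih =>
    intro run
    have hy := hg y (by simp)
    simp only [ddGen', ddPiece', hy]
    simp [ih fun z hz => hg z (by simp [hz])]

theorem ddHeadDropWhile {α : Type} (p : α → Bool) :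
    ∀ (l : List α) (a : α), (l.dropWhile p).head? = some a → p a = false := by
  intro l
  induction l with
  | nil => intro a h; simp [List.dropWhile] at h
  | cons b l ih =>
    intro a h
    rw [List.dropWhile_cons] at h
    split at h
    · exact ih a h
    · simp only [List.head?_cons, Option.some.injEq] at h
      subst h
      simpa using ‹¬ p b = true›

theorem ddRuns_cons (c : Char) (rest : List Char) :
    ddRuns (c :: rest) =
      (PySem.Chars.isdigit c,
        c :: rest.takeWhile (fun x => PySem.Chars.isdigit x == PySem.Chars.isdigit c)) ::
      ddRuns (rest.dropWhile (fun x => PySem.Chars.isdigit x == PySem.Chars.isdigit c)) := by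
  rw [ddRuns]

-- all characters of the first run share the class of its head
theorem ddRunClass (c : Char) (rest : List Char) :
    ∀ y ∈ c :: rest.takeWhile (fun x => PySem.Chars.isdigit x == PySem.Chars.isdigit c),
      PySem.Chars.isdigit y = PySem.Chars.isdigit c := by
  intro y hy
  rcases List.mem_cons.1 hy with h | h
  · rw [h]
  · have hp := List.mem_takeWhile_imp h
    exact eq_of_beq (by simpa using hp)

-- the join invariant: folding the runs of cs onto an accumulator ending in x
theorem ddJ : ∀ (n : Nat) (cs : List Char), cs.length ≤ n → ∀ (out : List Char) (x : Char),
    (∀ c', cs.head? = some c' → PySem.Chars.isdigit c' = true → PySem.Chars.isdigit x = false) →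
    (ddRuns cs).foldl ddJoinStep (out ++ [x]) = out ++ [x] ++ ddGen' (ddNext' x) cs := by
  intro n
  induction n with
  | zero =>
    intro cs hlen out x _
    have : cs = [] := List.length_eq_zero_iff.1 (Nat.le_zero.1 hlen)
    subst this
    simp [ddRuns, ddGen']
  | succ n ih =>
    intro cs hlen out x H
    match cs with
    | [] => simp [ddRuns, ddGen']
    | c :: rest =>
      rw [ddRuns_cons]
      set d := PySem.Chars.isdigit c with hd
      set g := c :: rest.takeWhile (fun x => PySem.Chars.isdigit x == d) with hgdef
      set rest' := rest.dropWhile (fun x => PySem.Chars.isdigit x == d) with hrest'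
      set sep := (if d && !(x == ' ') then out ++ [x] ++ [' '] else out ++ [x]) with hsep
      obtain ⟨init, gl, hge⟩ : ∃ init gl, g = init ++ [gl] := by
        rcases g.eq_nil_or_concat with h | ⟨L, b, h⟩
        · exact absurd h (by simp [hgdef])
        · exact ⟨L, b, by simpa using h⟩
      have hclass : ∀ y ∈ g, PySem.Chars.isdigit y = d := ddRunClass c rest
      have hgl : PySem.Chars.isdigit gl = d := hclass gl (by rw [hge]; simp)
      have hsplit : c :: rest = g ++ rest' := by
        simp [hgdef, hrest', List.takeWhile_append_dropWhile]
      have hstep : ddJoinStep (out ++ [x]) (d, g) = sep ++ g := by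
        simp [ddJoinStep, hsep]
      have hIH := ih rest' (by
          have hle := List.length_dropWhile_le (fun x => PySem.Chars.isdigit x == d) rest
          rw [← hrest'] at hle
          simp only [List.length_cons] at hlen
          omega)
        (sep ++ init) gl
        (by
          intro c' hc' hdig
          have hp := ddHeadDropWhile (fun x => PySem.Chars.isdigit x == d) rest c' hc'
          simp only [hdig] at hp
          rw [hgl]
          simpa using hp)
      have hacc : sep ++ g = sep ++ init ++ [gl] := by rw [hge, List.append_assoc]
      have hIH' : List.foldl ddJoinStep (sep ++ g) (ddRuns rest') =
          sep ++ g ++ ddGen' (ddNext' gl) rest' := by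
        rw [hacc, hIH]
      have hEnd : ddEnd (ddNext' x) g = ddNext' gl := by
        rw [hge]; exact ddEnd_concat _ _ _
      have hmain : sep ++ g = out ++ [x] ++ ddGen' (ddNext' x) g := by
        cases hdc : d with
        | false =>
          rw [ddGen'_nondigits g (by intro y hy; rw [hclass y hy, hdc]) (ddNext' x)]
          simp [hsep, hdc]
        | true =>
          have hx : PySem.Chars.isdigit x = false :=
            H c rfl (by rw [← hd, hdc])
          have hnx : ddNext' x = (x == ' ') := by simp [ddNext', hx]
          by_cases hsp : (x == ' ') = true
          · rw [hnx, hsp, ddGen'_digits g (by intro y hy; rw [hclass y hy, hdc])]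
            simp [hsep, hdc, hsp]
          · have hsp' : (x == ' ') = false := by simpa using hsp
            rw [hnx, hsp',
              ddGen'_digits_false g (by simp [hgdef]) (by intro y hy; rw [hclass y hy, hdc])]
            simp [hsep, hdc, hsp']
      rw [List.foldl_cons, hstep, hIH', hsplit, ddGen'_append g rest' (ddNext' x), hEnd]
      simp only [← List.append_assoc] at hmain ⊢
      rw [hmain]

-- B's join of the runs of a non-empty t produces ddGen' true t
theorem ddBmain (t : List Char) (hne : t ≠ []) :
    (match ddRuns t with
     | [] => (none : Option String)
     | (_, g0) :: gs => some (String.ofList (gs.foldl ddJoinStep g0))) =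
    some (String.ofList (ddGen' true t)) := by
  match t with
  | [] => exact absurd rfl hne
  | c :: rest =>
    rw [ddRuns_cons]
    set d := PySem.Chars.isdigit c with hd
    set g := c :: rest.takeWhile (fun x => PySem.Chars.isdigit x == d) with hgdef
    set rest' := rest.dropWhile (fun x => PySem.Chars.isdigit x == d) with hrest'
    obtain ⟨init, gl, hge⟩ : ∃ init gl, g = init ++ [gl] := by
      rcases g.eq_nil_or_concat with h | ⟨L, b, h⟩
      · exact absurd h (by simp [hgdef])
      · exact ⟨L, b, by simpa using h⟩
    have hclass : ∀ y ∈ g, PySem.Chars.isdigit y = d := ddRunClass c rest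
    have hgl : PySem.Chars.isdigit gl = d := hclass gl (by rw [hge]; simp)
    have hsplit : c :: rest = g ++ rest' := by
      simp [hgdef, hrest', List.takeWhile_append_dropWhile]
    have hIH := ddJ rest'.length rest' le_rfl init gl
      (by
        intro c' hc' hdig
        have hp := ddHeadDropWhile (fun x => PySem.Chars.isdigit x == d) rest c' hc'
        simp only [hdig] at hp
        rw [hgl]
        simpa using hp)
    have hIH' : List.foldl ddJoinStep g (ddRuns rest') = g ++ ddGen' (ddNext' gl) rest' := by
      rw [hge, hIH]
    have hgen : ddGen' true (c :: rest) = g ++ ddGen' (ddNext' gl) rest' := by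
      have hEnd : ddEnd true g = ddNext' gl := by rw [hge]; exact ddEnd_concat _ _ _
      rw [hsplit, ddGen'_append g rest' true, hEnd]
      congr 1
      cases hdc : d with
      | true => exact ddGen'_digits g (by intro y hy; rw [hclass y hy, hdc])
      | false => exact ddGen'_nondigits g (by intro y hy; rw [hclass y hy, hdc]) true
    rw [hgen]
    exact congrArg (fun l => some (String.ofList l)) hIH'

-- A's fold produces ddGen' true of the lowered string
theorem ddFoldA (cs : List Char) : ∀ (run : Bool) (acc : List Char),
    (cs.foldl detectDigitsStep (run, acc)).2 =
      acc ++ ddGen' run (cs.map PySem.Chars.lowerChar) := by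
  induction cs with
  | nil => intro run acc; simp [ddGen']
  | cons c cs ih =>
    intro run acc
    simp only [List.foldl_cons, List.map_cons, ddGen']
    have hstep : detectDigitsStep (run, acc) c =
        (ddNext' (PySem.Chars.lowerChar c), acc ++ ddPiece' run (PySem.Chars.lowerChar c)) := by
      simp only [detectDigitsStep, ddNext', ddPiece', tokenSeperator, ddIsdigitLower, ddSpaceLower]
      by_cases hd : PySem.Chars.isdigit c = true
      · cases run <;> simp [hd]
      · have hd' : PySem.Chars.isdigit c = false := by simpa using hd
        by_cases hc : c = ' '
        · subst hc
          simp [show PySem.Chars.isdigit ' ' = false from by decide]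
        · simp [hd', hc]
    rw [hstep, ih, List.append_assoc]

-- lower is the elementwise lowerChar map
theorem ddLowerMap (cs : List Char) : PySem.Chars.lower cs = cs.map PySem.Chars.lowerChar := by
  simp [PySem.Chars.lower]

-- ===== VERDICT (by name: the statement is the Claim_ definition above) =====
theorem detect_digits_spec : Claim_equal_detect_digits := by
  intro input_pw _
  unfold Spec_detect_digits detect_digits detect_digits_alt
  by_cases h : input_pw.toList = []
  · simp [h]
  · simp only [if_neg h]
    rw [ddLowerMap]
    rw [ddBmain (input_pw.toList.map PySem.Chars.lowerChar) (by simpa using h)]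
    rw [ddFoldA]
    simp
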